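-- pv_equiv track=rewrite | github.com/Asti1982/nomad-api | telegram_bot.py | _message_chunks
-- ===== SOURCE A (Python) =====
-- def _message_chunks(message: str, max_length: int = 3600) -> list[str]:
--     text = message or ""
--     if len(text) <= max_length:
--         return [text]
--     chunks: list[str] = []
--     current = ""
--     for line in text.splitlines():
--         candidate = f"{current}\n{line}" if current else line
--         if len(candidate) <= max_length:
--             current = candidate
--             continue
--         if current:
--             chunks.append(current)
--             current = ""
--         while len(line) > max_length:
--             chunks.append(line[:max_length])
--             line = line[max_length:]
--         current = line
--     if current:
--         chunks.append(current)
--     return chunks or [""]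
-- ===== SOURCE B (Python) =====
-- def _fragments(line: str, max_length: int) -> list[str]:
--     if len(line) > max_length:
--         return [line[i:i + max_length] for i in range(0, len(line), max_length)]
--     return [line]
--
--
-- def _message_chunks(message: str, max_length: int = 3600) -> list[str]:
--     text = message or ""
--     if len(text) <= max_length:
--         return [text]
--     # pass 1: flatten the lines into fragments, each at most max_length long
--     fragments = [piece for line in text.splitlines()
--                  for piece in _fragments(line, max_length)]
--     # pass 2: pack fragments into chunks, keeping the buffer as a fragment
--     # list with a running size counter, joined with newlines only on flush
--     chunks: list[str] = []
--     buf: list[str] = []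
--     size = 0
--     for frag in fragments:
--         if not buf:
--             if frag:
--                 buf = [frag]
--                 size = len(frag)
--         elif size + 1 + len(frag) <= max_length:
--             buf.append(frag)
--             size += 1 + len(frag)
--         else:
--             chunks.append("\n".join(buf))
--             buf = [frag] if frag else []
--             size = len(frag)
--     if buf:
--         chunks.append("\n".join(buf))
--     return chunks or [""]
-- ===== Notes on version B (the rewrite author's own statement) =====
-- stated objective: alternative
-- what changed: A's single stateful loop with an in-place line-mutating inner while and a string accumulator is replaced by two staged passes: a flatMap comprehension producing <=max_length fragments, then a packer that keeps the pending chunk as a fragment LIST with a running size counter and joins it with newlines only on flush.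
-- outside the precondition, e.g. on _message_chunks('\n', 0): A returns [''], B returns ['']
import Mathlib
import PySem

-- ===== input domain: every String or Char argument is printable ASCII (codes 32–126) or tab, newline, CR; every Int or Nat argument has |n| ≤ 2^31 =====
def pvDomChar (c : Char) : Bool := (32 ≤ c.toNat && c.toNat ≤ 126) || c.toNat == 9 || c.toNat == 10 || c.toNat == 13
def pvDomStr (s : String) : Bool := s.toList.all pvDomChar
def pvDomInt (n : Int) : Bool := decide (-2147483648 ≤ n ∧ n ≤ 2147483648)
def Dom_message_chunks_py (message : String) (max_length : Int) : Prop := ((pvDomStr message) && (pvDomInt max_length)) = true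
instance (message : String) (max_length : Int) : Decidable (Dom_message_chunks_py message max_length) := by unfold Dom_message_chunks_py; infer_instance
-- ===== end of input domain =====

-- B replaces A's single stateful loop (string accumulator, in-place line-splitting inner while) by
-- two staged passes: a flatMap into ≤max_length fragments, then a packer whose buffer is a fragment
-- LIST with a running size counter, newline-joined only on flush; objective: alternative (same cost).

-- ===== PORT A =====
-- while len(line) > max_length: chunks.append(line[:max_length]); line = line[max_length:]
-- (line[:m] / line[m:] for 0 ≤ m are take/drop; returns (appended pieces, final line);
--  for max_length ≤ 0 Python never leaves this loop — those inputs are outside Pre_ and the guard just stops)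
def pyASplitLong (m : Int) (line : List Char) : List (List Char) × List Char :=
  if h : m < (line.length : Int) then
    if h1 : 1 ≤ m then
      let rest := pyASplitLong m (line.drop m.toNat)
      (line.take m.toNat :: rest.1, rest.2)
    else ([], line)
  else ([], line)
termination_by line.length
decreasing_by simp only [List.length_drop]; omega

-- one iteration of A's `for line in text.splitlines()` body, state = (chunks, current)
def pyAStep (m : Int) (st : List (List Char) × List Char) (line : List Char) :
    List (List Char) × List Char :=
  let candidate := if st.2 ≠ [] then st.2 ++ '\n' :: line else line
  if (candidate.length : Int) ≤ m then (st.1, candidate)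
  else
    let chunks := if st.2 ≠ [] then st.1 ++ [st.2] else st.1
    let res := pyASplitLong m line
    (chunks ++ res.1, res.2)

def message_chunks_py (message : String) (max_length : Int) : List String :=
  let text := message.toList   -- `message or ""` is message itself ("" stays "")
  if (text.length : Int) ≤ max_length then [String.mk text]
  else
    let st := (PySem.Chars.splitlines text).foldl (pyAStep max_length) ([], [])
    let chunks := if st.2 ≠ [] then st.1 ++ [st.2] else st.1
    if chunks = [] then [""] else chunks.map String.mk

-- ===== PORT B =====
-- _fragments(line, max_length): range-stepped slices if the line is too long, else [line]
def pyBFrag (m : Int) (line : List Char) : List (List Char) :=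
  if m < (line.length : Int) then
    (PySem.List.pyRange 0 line.length m).map
      (fun i => PySem.List.slice line (some i) (some (i + m)))
  else [line]

-- "\n".join(buf), ported by hand on char lists (exact: Python's join interleaves the separator)
def pyJoinNL : List (List Char) → List Char
  | [] => []
  | [l] => l
  | l :: ls => l ++ '\n' :: pyJoinNL ls

-- one iteration of B's packing loop, state = (chunks, buf, size)
def pyBPack (m : Int) (st : List (List Char) × List (List Char) × Int) (frag : List Char) :
    List (List Char) × List (List Char) × Int :=
  if st.2.1 = [] then
    if frag ≠ [] then (st.1, [frag], (frag.length : Int)) else st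
  else if st.2.2 + 1 + (frag.length : Int) ≤ m then
    (st.1, st.2.1 ++ [frag], st.2.2 + 1 + (frag.length : Int))
  else
    (st.1 ++ [pyJoinNL st.2.1], if frag ≠ [] then [frag] else [], (frag.length : Int))

def message_chunks_py_alt (message : String) (max_length : Int) : List String :=
  let text := message.toList
  if (text.length : Int) ≤ max_length then [String.mk text]
  else
    let fragments := (PySem.Chars.splitlines text).flatMap (pyBFrag max_length)
    let st := fragments.foldl (pyBPack max_length) ([], [], 0)
    let chunks := if st.2.1 ≠ [] then st.1 ++ [pyJoinNL st.2.1] else st.1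
    if chunks = [] then [""] else chunks.map String.mk

-- ===== PRECONDITION & SPEC =====
-- Pre_ excludes non-positive max_length with a nonempty message: there A's inner while loop slices
-- without shrinking the line and loops forever — except on the residual corner max_length = 0 with a
-- message made only of line breaks, where A happens to return [''] (and B returns [''] there too).
def Pre_message_chunks_py (message : String) (max_length : Int) : Prop :=
  1 ≤ max_length ∨ message.toList = []
instance (message : String) (max_length : Int) : Decidable (Pre_message_chunks_py message max_length) := by unfold Pre_message_chunks_py; infer_instance

def pvWitness_message_chunks_py : String × Int := ("hello\nworld", 5)

def Spec_message_chunks_py (message : String) (max_length : Int) (out : List String) : Prop := out = message_chunks_py_alt message max_length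
instance (message : String) (max_length : Int) (out : List String) : Decidable (Spec_message_chunks_py message max_length out) := by unfold Spec_message_chunks_py; infer_instance

-- ===== CLAIM (what is proved, stated in full; the proofs are below) =====
def Claim_equal_message_chunks_py : Prop := ∀ (message : String) (max_length : Int), Dom_message_chunks_py message max_length → Pre_message_chunks_py message max_length → Spec_message_chunks_py message max_length (message_chunks_py message max_length)

-- ===== LEMMAS AND PROOFS =====

-- the simulation relation: A's `current` string vs B's (buf, size) buffer
def pvRel (cur : List Char) (bs : List (List Char) × Int) : Prop :=
  cur = pyJoinNL bs.1 ∧ (bs.1 = [] ∨ (bs.2 = (cur.length : Int) ∧ cur ≠ []))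

theorem pyASplitLong_of_le (m : Int) (line : List Char) (h : (line.length : Int) ≤ m) :
    pyASplitLong m line = ([], line) := by
  rw [pyASplitLong, dif_neg (by omega)]

theorem pyASplitLong_unfold (mN : Nat) (line : List Char) (hm : 1 ≤ mN) (h : mN < line.length) :
    pyASplitLong (mN : Int) line =
      ((line.take mN) :: (pyASplitLong (mN : Int) (line.drop mN)).1,
        (pyASplitLong (mN : Int) (line.drop mN)).2) := by
  rw [pyASplitLong, dif_pos (by exact_mod_cast h), dif_pos (by exact_mod_cast hm)]
  simp

-- A's while loop, read off as the list of range-stepped slices: pieces ++ [remainder]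
theorem splitLong_spec (mN : Nat) (hm : 1 ≤ mN) :
    ∀ (L : Nat) (line : List Char), line.length ≤ L → mN < line.length →
      (pyASplitLong (mN : Int) line).1 ++ [(pyASplitLong (mN : Int) line).2] =
        (List.range ((line.length + mN - 1) / mN)).map
          (fun k => (line.drop (mN * k)).take mN) := by
  intro L
  induction L with
  | zero => intro line hle hlt; omega
  | succ L ih =>
    intro line hle hlt
    have hceil : (line.length + mN - 1) / mN = ((line.length - mN) + mN - 1) / mN + 1 := by
      have h1 : line.length + mN - 1 = (line.length - 1) + mN := by omega
      have h2 : (line.length - mN) + mN - 1 = line.length - 1 := by omega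
      rw [h1, h2, Nat.add_div_right _ (by omega)]
    rw [pyASplitLong_unfold mN line hm hlt, hceil, List.range_succ_eq_map]
    by_cases hrec : mN < (line.drop mN).length
    · have := ih (line.drop mN) (by simp; omega) hrec
      simp only [List.length_drop] at this
      simp only [List.cons_append, List.map_cons, List.map_map]
      rw [this]
      simp [Function.comp, Nat.mul_succ, List.drop_drop, Nat.add_comm]
    · -- last round: the dropped rest fits, single remaining slice
      have hlen : (line.drop mN).length = line.length - mN := by simp
      have h2 : ((line.length - mN) + mN - 1) / mN = 1 := by
        apply Nat.div_eq_of_lt_le <;> omega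
      rw [pyASplitLong_of_le _ _ (by simp at hrec ⊢; omega), h2]
      simp [List.range_succ, List.take_of_length_le (by simp at hrec ⊢; omega : (line.drop mN).length ≤ mN)]

theorem pvIntDivCast (a b : Nat) : (((a : Int)) / ((b : Int))).toNat = a / b := by
  rw [← Int.natCast_div]
  exact Int.toNat_natCast _

-- B's fragments of a long line are exactly those slices
theorem pyBFrag_of_lt (mN : Nat) (hm : 1 ≤ mN) (line : List Char) (h : mN < line.length) :
    pyBFrag (mN : Int) line =
      (List.range ((line.length + mN - 1) / mN)).map
        (fun k => (line.drop (mN * k)).take mN) := by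
  rw [pyBFrag, if_pos (by exact_mod_cast h),
    PySem.List.pyRange_of_pos 0 line.length (by exact_mod_cast hm),
    if_pos (by exact_mod_cast (by omega : 0 < line.length))]
  rw [List.map_map]
  have hn : (((line.length : Int) - 0 + mN - 1) / mN).toNat = (line.length + mN - 1) / mN := by
    have : ((line.length : Int) - 0 + mN - 1) = ((line.length + mN - 1 : Nat) : Int) := by
      push_cast; omega
    rw [this, pvIntDivCast]
  rw [hn]
  apply List.map_congr_left
  intro k _
  have h1 : (0 : Int) + mN * k = ((mN * k : Nat) : Int) := by push_cast; ring
  have h2 : (0 : Int) + mN * k + mN = ((mN * k : Nat) : Int) + ((mN : Nat) : Int) := by push_cast; ring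
  simp only [Function.comp, h1, h2, PySem.List.slice_natCast_add]

-- every fragment B produces is at most mN long
theorem pyBFrag_short (mN : Nat) (line : List Char) (hline : line.length ≤ mN) :
    pyBFrag (mN : Int) line = [line] := by
  rw [pyBFrag, if_neg (by exact_mod_cast Nat.not_lt.mpr hline)]

theorem pyBFrag_len (mN : Nat) (hm : 1 ≤ mN) (line : List Char) :
    ∀ f ∈ pyBFrag (mN : Int) line, f.length ≤ mN := by
  intro f hf
  by_cases h : mN < line.length
  · rw [pyBFrag_of_lt mN hm line h] at hf
    obtain ⟨k, _, rfl⟩ := List.mem_map.mp hf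
    simpa using List.length_take_le mN _
  · rw [pyBFrag_short mN line (by omega)] at hf
    simp at hf; subst hf; omega

theorem pyJoinNL_cons (b : List Char) (l : List (List Char)) (h : l ≠ []) :
    pyJoinNL (b :: l) = b ++ '\n' :: pyJoinNL l := by
  cases l with
  | nil => exact absurd rfl h
  | cons x xs => rfl

theorem pyJoinNL_append (buf : List (List Char)) (f : List Char) (h : buf ≠ []) :
    pyJoinNL (buf ++ [f]) = pyJoinNL buf ++ '\n' :: f := by
  induction buf with
  | nil => exact absurd rfl h
  | cons b bs ih =>
    rw [List.cons_append, pyJoinNL_cons b (bs ++ [f]) (by simp)]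
    cases bs with
    | nil => simp [pyJoinNL]
    | cons b2 bs2 =>
      rw [ih (by simp), pyJoinNL_cons b (b2 :: bs2) (by simp)]
      simp

-- evaluation lemmas for the two step functions
theorem stepA_empty (m : Int) (ch : List (List Char)) (frag : List Char)
    (hfit : (frag.length : Int) ≤ m) : pyAStep m (ch, []) frag = (ch, frag) := by
  have e1 : (if ([] : List Char) ≠ [] then ([] : List Char) ++ '\n' :: frag else frag) = frag := by
    simp
  simp only [pyAStep, e1]
  rw [if_pos hfit]

theorem stepA_full (m : Int) (ch : List (List Char)) (cur frag : List Char) (hc : cur ≠ []) :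
    pyAStep m (ch, cur) frag =
      if ((cur.length : Int) + 1 + (frag.length : Int) ≤ m) then (ch, cur ++ '\n' :: frag)
      else ((ch ++ [cur]) ++ (pyASplitLong m frag).1, (pyASplitLong m frag).2) := by
  have e1 : (if cur ≠ [] then cur ++ '\n' :: frag else frag) = cur ++ '\n' :: frag := if_pos hc
  have e2 : (if cur ≠ [] then ch ++ [cur] else ch) = ch ++ [cur] := if_pos hc
  have e3 : (((cur ++ '\n' :: frag).length : Int) ≤ m) ↔
      ((cur.length : Int) + 1 + (frag.length : Int) ≤ m) := by
    constructor <;> intro h <;> (simp at h ⊢; omega)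
  simp only [pyAStep, e1, e2, e3]

theorem packB_empty (m : Int) (ch : List (List Char)) (bs : List (List Char) × Int)
    (frag : List Char) (hbuf : bs.1 = []) :
    pyBPack m (ch, bs) frag =
      if frag ≠ [] then (ch, [frag], (frag.length : Int)) else (ch, bs) := by
  simp only [pyBPack]
  rw [if_pos hbuf]

theorem packB_full (m : Int) (ch : List (List Char)) (bs : List (List Char) × Int)
    (frag : List Char) (hbuf : bs.1 ≠ []) :
    pyBPack m (ch, bs) frag =
      if bs.2 + 1 + (frag.length : Int) ≤ m then (ch, bs.1 ++ [frag], bs.2 + 1 + (frag.length : Int))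
      else (ch ++ [pyJoinNL bs.1], if frag ≠ [] then [frag] else [], (frag.length : Int)) := by
  simp only [pyBPack]
  rw [if_neg hbuf]

-- one packer step simulates pyAStep on a short fragment
theorem packStep (mN : Nat) (ch : List (List Char)) (cur : List Char)
    (bs : List (List Char) × Int) (frag : List Char) (hf : frag.length ≤ mN)
    (hrel : pvRel cur bs) :
    (pyBPack (mN : Int) (ch, bs) frag).1 = (pyAStep (mN : Int) (ch, cur) frag).1 ∧
      pvRel (pyAStep (mN : Int) (ch, cur) frag).2 (pyBPack (mN : Int) (ch, bs) frag).2 := by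
  obtain ⟨hj, hinv⟩ := hrel
  by_cases hbuf : bs.1 = []
  · have hcur : cur = [] := by rw [hj, hbuf]; rfl
    have hfit : ((frag.length : Int) ≤ (mN : Int)) := by exact_mod_cast hf
    rw [hcur, stepA_empty (mN : Int) ch frag hfit, packB_empty (mN : Int) ch bs frag hbuf]
    by_cases hfr : frag = []
    · rw [if_neg (by simpa using hfr)]
      refine ⟨rfl, ?_, Or.inl hbuf⟩
      show frag = pyJoinNL bs.1
      rw [hfr, hbuf]
      rfl
    · rw [if_pos hfr]
      exact ⟨rfl, rfl, Or.inr ⟨rfl, hfr⟩⟩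
  · have hcne : cur ≠ [] := by
      rcases hinv with h | ⟨_, h⟩
      · exact absurd h hbuf
      · exact h
    have hsz : bs.2 = (cur.length : Int) := by
      rcases hinv with h | ⟨h, _⟩
      · exact absurd h hbuf
      · exact h
    rw [stepA_full (mN : Int) ch cur frag hcne, packB_full (mN : Int) ch bs frag hbuf, hsz]
    by_cases hfits : (cur.length : Int) + 1 + (frag.length : Int) ≤ (mN : Int)
    · rw [if_pos hfits, if_pos hfits]
      refine ⟨rfl, ?_, Or.inr ⟨?_, by simp⟩⟩
      · show cur ++ '\n' :: frag = pyJoinNL (bs.1 ++ [frag])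
        rw [pyJoinNL_append bs.1 frag hbuf, ← hj]
      · show (cur.length : Int) + 1 + (frag.length : Int) = ((cur ++ '\n' :: frag).length : Int)
        simp
        omega
    · rw [if_neg hfits, if_neg hfits]
      have hsplit : pyASplitLong (mN : Int) frag = ([], frag) :=
        pyASplitLong_of_le _ _ (by exact_mod_cast hf)
      rw [hsplit]
      refine ⟨?_, ?_⟩
      · show ch ++ [pyJoinNL bs.1] = (ch ++ [cur]) ++ []
        rw [hj]
        simp
      · by_cases hfr : frag = []
        · rw [if_neg (by simpa using hfr)]
          exact ⟨by rw [hfr]; rfl, Or.inl rfl⟩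
        · rw [if_pos hfr]
          exact ⟨rfl, Or.inr ⟨rfl, hfr⟩⟩

-- folding the packer over any list of short fragments simulates folding pyAStep over them
theorem packFold (mN : Nat) (frags : List (List Char)) (hfr : ∀ f ∈ frags, f.length ≤ mN) :
    ∀ (ch : List (List Char)) (cur : List Char) (bs : List (List Char) × Int),
      pvRel cur bs →
      (frags.foldl (pyBPack (mN : Int)) (ch, bs)).1 =
          (frags.foldl (pyAStep (mN : Int)) (ch, cur)).1 ∧
        pvRel (frags.foldl (pyAStep (mN : Int)) (ch, cur)).2
          (frags.foldl (pyBPack (mN : Int)) (ch, bs)).2 := by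
  induction frags with
  | nil => intro ch cur bs hrel; exact ⟨rfl, hrel⟩
  | cons f fs ih =>
    intro ch cur bs hrel
    obtain ⟨h1, h2⟩ := packStep mN ch cur bs f (hfr f (by simp)) hrel
    simp only [List.foldl_cons]
    have hA : pyAStep (mN : Int) (ch, cur) f =
        ((pyAStep (mN : Int) (ch, cur) f).1, (pyAStep (mN : Int) (ch, cur) f).2) := rfl
    have hB : pyBPack (mN : Int) (ch, bs) f =
        ((pyBPack (mN : Int) (ch, bs) f).1, (pyBPack (mN : Int) (ch, bs) f).2) := rfl
    rw [hA, hB, h1]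
    exact ih (fun g hg => hfr g (by simp [hg])) _ _ _ h2

-- A side: a long line's step equals folding pyAStep over its pieces ++ remainder
theorem stepA_pieces (mN : Nat) (hm : 1 ≤ mN) :
    ∀ (L : Nat) (line : List Char), line.length ≤ L → mN < line.length →
      ∀ st : List (List Char) × List Char,
      List.foldl (pyAStep (mN : Int)) st
          ((pyASplitLong (mN : Int) line).1 ++ [(pyASplitLong (mN : Int) line).2]) =
        ((if st.2 ≠ [] then st.1 ++ [st.2] else st.1) ++ (pyASplitLong (mN : Int) line).1,
          (pyASplitLong (mN : Int) line).2) := by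
  intro L
  induction L with
  | zero => intro line hle hlt; omega
  | succ L ih =>
    intro line hle hlt st
    rw [pyASplitLong_unfold mN line hm hlt]
    have htake : (line.take mN).length = mN := by simp; omega
    have hne : line.take mN ≠ [] := by intro hnil; rw [hnil] at htake; simp at htake; omega
    have hsplit1 : pyASplitLong (mN : Int) (line.take mN) = ([], line.take mN) :=
      pyASplitLong_of_le _ _ (by rw [htake])
    have hstep : pyAStep (mN : Int) st (line.take mN) =
        ((if st.2 ≠ [] then st.1 ++ [st.2] else st.1), line.take mN) := by
      rw [pyAStep]
      by_cases hc : st.2 = []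
      · simp [hc, htake, hsplit1]
      · rw [if_neg (by simp [hc, htake]; omega)]
        simp [hc, hsplit1]
    by_cases hrec : mN < (line.drop mN).length
    · simp only [List.cons_append, List.foldl_cons, hstep]
      rw [ih (line.drop mN) (by simp; omega) hrec]
      simp [hne]
    · have hrest : pyASplitLong (mN : Int) (line.drop mN) = ([], line.drop mN) :=
        pyASplitLong_of_le _ _ (by simp at hrec ⊢; omega)
      rw [hrest]
      simp only [List.cons_append, List.nil_append, List.foldl_cons, hstep, List.foldl_cons,
        List.foldl_nil]
      rw [pyAStep]
      rw [if_neg (by simp [hne, htake]; push_cast; omega)]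
      have : pyASplitLong (mN : Int) (line.drop mN) = ([], line.drop mN) := hrest
      simp [hne, this]

-- A side: pyAStep on any line equals folding pyAStep over B's fragments of that line
theorem stepA_frag (mN : Nat) (hm : 1 ≤ mN) (line : List Char)
    (st : List (List Char) × List Char) :
    List.foldl (pyAStep (mN : Int)) st (pyBFrag (mN : Int) line) = pyAStep (mN : Int) st line := by
  by_cases hlong : mN < line.length
  · rw [pyBFrag_of_lt mN hm line hlong, ← splitLong_spec mN hm line.length line le_rfl hlong,
      stepA_pieces mN hm line.length line le_rfl hlong st]
    rw [pyAStep]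
    have hnofit : ¬ (((if st.2 ≠ [] then st.2 ++ '\n' :: line else line).length : Int) ≤ (mN : Int)) := by
      by_cases hc : st.2 = [] <;> simp [hc] <;> push_cast <;> omega
    rw [if_neg hnofit]
  · rw [pyBFrag_short mN line (by omega)]
    simp

-- whole loop: B's fold over the flatMapped fragments simulates A's fold over the lines
theorem packLines (mN : Nat) (hm : 1 ≤ mN) (lines : List (List Char)) :
    ∀ (ch : List (List Char)) (cur : List Char) (bs : List (List Char) × Int),
      pvRel cur bs →
      ((lines.flatMap (pyBFrag (mN : Int))).foldl (pyBPack (mN : Int)) (ch, bs)).1 =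
          (lines.foldl (pyAStep (mN : Int)) (ch, cur)).1 ∧
        pvRel (lines.foldl (pyAStep (mN : Int)) (ch, cur)).2
          ((lines.flatMap (pyBFrag (mN : Int))).foldl (pyBPack (mN : Int)) (ch, bs)).2 := by
  induction lines with
  | nil => intro ch cur bs hrel; exact ⟨rfl, hrel⟩
  | cons l ls ih =>
    intro ch cur bs hrel
    rw [List.flatMap_cons, List.foldl_append, List.foldl_cons]
    obtain ⟨h1, h2⟩ := packFold mN (pyBFrag (mN : Int) l) (pyBFrag_len mN hm l) ch cur bs hrel
    rw [stepA_frag mN hm l (ch, cur)] at h1 h2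
    have hB : ((pyBFrag (mN : Int) l).foldl (pyBPack (mN : Int)) (ch, bs)) =
        (((pyBFrag (mN : Int) l).foldl (pyBPack (mN : Int)) (ch, bs)).1,
          ((pyBFrag (mN : Int) l).foldl (pyBPack (mN : Int)) (ch, bs)).2) := rfl
    have hA : pyAStep (mN : Int) (ch, cur) l =
        ((pyAStep (mN : Int) (ch, cur) l).1, (pyAStep (mN : Int) (ch, cur) l).2) := rfl
    rw [hB, hA, h1]
    exact ih _ _ _ h2

-- ===== VERDICT (by name: the statement is the Claim_ definition above) =====
theorem message_chunks_py_spec : Claim_equal_message_chunks_py := by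
  intro message m _ hPre
  unfold Spec_message_chunks_py message_chunks_py message_chunks_py_alt
  by_cases hfit : ((message.toList.length : Int) ≤ m)
  · rw [if_pos hfit, if_pos hfit]
  · rw [if_neg hfit, if_neg hfit]
    rcases hPre with hm | hnil
    · lift m to ℕ using (by omega) with mN
      obtain ⟨h1, h2, h3⟩ := packLines mN (by exact_mod_cast hm)
        (PySem.Chars.splitlines message.toList) [] [] ([], 0) ⟨rfl, Or.inl rfl⟩
      set stA := (PySem.Chars.splitlines message.toList).foldl (pyAStep (mN : Int)) ([], []) with hA
      set stB := ((PySem.Chars.splitlines message.toList).flatMap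
        (pyBFrag (mN : Int))).foldl (pyBPack (mN : Int)) ([], [], 0) with hB
      rcases h3 with hb | ⟨_, hcne⟩
      · have hcur : stA.2 = [] := by rw [h2, hb]; rfl
        have e1 : (if stA.2 ≠ [] then stA.1 ++ [stA.2] else stA.1) = stA.1 := by simp [hcur]
        have e2 : (if stB.2.1 ≠ [] then stB.1 ++ [pyJoinNL stB.2.1] else stB.1) = stB.1 := by
          simp [hb]
        rw [e1, e2, h1]
      · have hbne : stB.2.1 ≠ [] := by
          intro hb; rw [h2, hb] at hcne; exact hcne rfl
        have e1 : (if stA.2 ≠ [] then stA.1 ++ [stA.2] else stA.1) = stA.1 ++ [stA.2] :=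
          if_pos hcne
        have e2 : (if stB.2.1 ≠ [] then stB.1 ++ [pyJoinNL stB.2.1] else stB.1) =
            stB.1 ++ [pyJoinNL stB.2.1] := if_pos hbne
        rw [e1, e2, h1, ← h2]
    · rw [hnil]
      simp [PySem.Chars.splitlines, PySem.Chars.splitlines.go]
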